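-- pv_equiv track=rewrite | github.com/khnhk0ogei04/Data-structure-and-Algorithm--IT3011 | sum_right_nodes.py | sum_right_leaves
-- ===== SOURCE A (Python) =====
-- def sum_right_leaves(tree, root):
--     stack = [(root, False)]
--     sum = 0
--     while stack:
--         node, is_right = stack.pop()
--         left, right = tree.get(node, (None, None))
--         if is_right and left is None and right is None:
--             sum += node
--         if right is not None:
--             stack.append((right, True))
--         if left is not None:
--             stack.append((left, False))
--     return sum
-- ===== SOURCE B (Python) =====
-- def sum_right_leaves(tree, root):
--     def rec(node, is_right):
--         left, right = tree.get(node, (None, None))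
--         if is_right and left is None and right is None:
--             return node
--         total = 0
--         if left is not None:
--             total += rec(left, False)
--         if right is not None:
--             total += rec(right, True)
--         return total
--     return rec(root, False)
-- ===== Notes on version B (the rewrite author's own statement) =====
-- stated objective: alternative
-- what changed: Replaces the explicit stack + while loop with a direct structural recursion rec(node, is_right) over the tree mapping; Pre_ excludes exactly the inputs on which A's while loop never returns (a cycle of child links reachable from the root).
import Mathlib
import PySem

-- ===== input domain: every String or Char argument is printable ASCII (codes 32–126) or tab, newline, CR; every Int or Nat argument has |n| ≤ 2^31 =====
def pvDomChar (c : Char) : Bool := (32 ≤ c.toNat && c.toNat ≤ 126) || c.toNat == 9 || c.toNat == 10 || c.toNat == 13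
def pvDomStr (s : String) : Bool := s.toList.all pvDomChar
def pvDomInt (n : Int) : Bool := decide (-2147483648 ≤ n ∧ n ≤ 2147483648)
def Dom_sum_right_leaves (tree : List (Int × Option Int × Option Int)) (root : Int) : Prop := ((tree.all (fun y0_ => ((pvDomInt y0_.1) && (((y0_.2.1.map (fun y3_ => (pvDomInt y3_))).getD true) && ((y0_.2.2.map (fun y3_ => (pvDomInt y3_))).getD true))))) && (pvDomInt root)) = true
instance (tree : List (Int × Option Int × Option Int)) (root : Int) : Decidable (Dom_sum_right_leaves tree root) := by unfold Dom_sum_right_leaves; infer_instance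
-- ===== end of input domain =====

-- B replaces A's explicit stack + while loop by direct structural recursion over the tree mapping
-- (alternative decomposition, same asymptotic cost); equality of the return values is proved on Pre_.

-- ===== PORT A =====
-- the while loop: fuel bounds the number of pops (never exhausted on Pre_ inputs); state = (stack, sum)
def pvLoopA (tree : List (Int × Option Int × Option Int)) :
    Nat → List (Int × Bool) → Int → Int
  | 0, _, s => s
  | _ + 1, [], s => s
  | fuel + 1, (node, is_right) :: st, s =>
    let lr := (List.lookup node tree).getD (none, none)
    let s' := if is_right = true ∧ lr.1 = none ∧ lr.2 = none then s + node else s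
    let st1 := match lr.2 with
      | some rv => (rv, true) :: st
      | none => st
    let st2 := match lr.1 with
      | some lv => (lv, false) :: st1
      | none => st1
    pvLoopA tree fuel st2 s'

def sum_right_leaves (tree : List (Int × Option Int × Option Int)) (root : Int) : Int :=
  pvLoopA tree (3 ^ (tree.length + 1)) [(root, false)] 0

-- ===== PORT B =====
-- rec(node, is_right): fuel bounds the recursion depth (never exhausted on Pre_ inputs)
def pvRecB (tree : List (Int × Option Int × Option Int)) :
    Nat → Int → Bool → Int
  | 0, _, _ => 0
  | fuel + 1, node, is_right =>
    let lr := (List.lookup node tree).getD (none, none)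
    if is_right = true ∧ lr.1 = none ∧ lr.2 = none then node
    else
      (match lr.1 with
        | some lv => pvRecB tree fuel lv false
        | none => 0) +
      (match lr.2 with
        | some rv => pvRecB tree fuel rv true
        | none => 0)

def sum_right_leaves_alt (tree : List (Int × Option Int × Option Int)) (root : Int) : Int :=
  pvRecB tree (tree.length + 1) root false

-- ===== PRECONDITION & SPEC =====
-- the child values of a node under the tree mapping
def pvChildren (tree : List (Int × Option Int × Option Int)) (n : Int) : List Int :=
  match List.lookup n tree with
  | none => []
  | some (l, r) => l.toList ++ r.toList

-- all one-step extensions of a child-link chain (chains are stored end-first)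
def pvExt (tree : List (Int × Option Int × Option Int)) (c : List Int) : List (List Int) :=
  match c.head? with
  | none => []
  | some n => (pvChildren tree n).map (fun x => x :: c)

-- all child-link chains from root with exactly k steps (length k+1)
def pvChainsN (tree : List (Int × Option Int × Option Int)) (root : Int) :
    Nat → List (List Int)
  | 0 => [[root]]
  | k + 1 => (pvChainsN tree root k).flatMap (pvExt tree)

-- Pre_ excludes exactly the inputs on which A never returns: a child-link chain of length
-- tree.length+2 starts at root only if (by pigeonhole on the keys) a cycle of child links is
-- reachable from root, and on those inputs A's while loop revisits the cycle forever;
-- on every input where A returns a value, Pre_ holds.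
def Pre_sum_right_leaves (tree : List (Int × Option Int × Option Int)) (root : Int) : Prop :=
  pvChainsN tree root (tree.length + 1) = []

instance (tree : List (Int × Option Int × Option Int)) (root : Int) :
    Decidable (Pre_sum_right_leaves tree root) := by
  unfold Pre_sum_right_leaves; infer_instance

def pvWitness_sum_right_leaves : (List (Int × Option Int × Option Int)) × Int :=
  ([(1, some 2, some 3), (2, none, none), (3, none, none)], 1)

def Spec_sum_right_leaves (tree : List (Int × Option Int × Option Int)) (root : Int) (out : Int) : Prop := out = sum_right_leaves_alt tree root
instance (tree : List (Int × Option Int × Option Int)) (root : Int) (out : Int) : Decidable (Spec_sum_right_leaves tree root out) := by unfold Spec_sum_right_leaves; infer_instance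

-- ===== CLAIM (what is proved, stated in full; the proofs are below) =====
def Claim_equal_sum_right_leaves : Prop := ∀ (tree : List (Int × Option Int × Option Int)) (root : Int), Dom_sum_right_leaves tree root → Pre_sum_right_leaves tree root → Spec_sum_right_leaves tree root (sum_right_leaves tree root)

-- ===== LEMMAS AND PROOFS =====

theorem pvWitness_ok :
    Dom_sum_right_leaves pvWitness_sum_right_leaves.1 pvWitness_sum_right_leaves.2 ∧
    Pre_sum_right_leaves pvWitness_sum_right_leaves.1 pvWitness_sum_right_leaves.2 := by
  constructor <;> decide

-- "some chain of k steps from root ends at node"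
def pvEnd (tree : List (Int × Option Int × Option Int)) (root : Int) (k : Nat) (node : Int) : Prop :=
  ∃ c ∈ pvChainsN tree root k, c.head? = some node

theorem chains_empty_succ (tree : List (Int × Option Int × Option Int)) (root : Int) (m : Nat)
    (h : pvChainsN tree root m = []) : pvChainsN tree root (m + 1) = [] := by
  simp [pvChainsN, h]

theorem chains_empty_of_ge (tree : List (Int × Option Int × Option Int)) (root : Int)
    (hp : Pre_sum_right_leaves tree root) :
    ∀ m, tree.length + 1 ≤ m → pvChainsN tree root m = [] := by
  intro m hm
  obtain ⟨d, rfl⟩ : ∃ d, m = tree.length + 1 + d := ⟨m - (tree.length + 1), by omega⟩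
  clear hm
  induction d with
  | zero => exact hp
  | succ d ih => exact chains_empty_succ tree root _ ih

theorem end_le (tree : List (Int × Option Int × Option Int)) (root : Int)
    (hp : Pre_sum_right_leaves tree root) {k : Nat} {node : Int}
    (h : pvEnd tree root k node) : k ≤ tree.length := by
  by_contra hk
  obtain ⟨c, hc, _⟩ := h
  rw [chains_empty_of_ge tree root hp k (by omega)] at hc
  exact absurd hc (List.not_mem_nil)

theorem end_root (tree : List (Int × Option Int × Option Int)) (root : Int) :
    pvEnd tree root 0 root :=
  ⟨[root], by simp [pvChainsN]⟩

theorem end_child (tree : List (Int × Option Int × Option Int)) (root : Int)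
    {k : Nat} {n x : Int} (h : pvEnd tree root k n) (hx : x ∈ pvChildren tree n) :
    pvEnd tree root (k + 1) x := by
  obtain ⟨c, hc, hh⟩ := h
  refine ⟨x :: c, ?_, rfl⟩
  simp only [pvChainsN, List.mem_flatMap]
  exact ⟨c, hc, by simp [pvExt, hh, List.mem_map]; exact hx⟩

-- children as seen by the ports' lookup
theorem mem_children_left (tree : List (Int × Option Int × Option Int)) {n lv : Int}
    {r : Option Int} (h : List.lookup n tree = some (some lv, r)) :
    lv ∈ pvChildren tree n := by
  simp [pvChildren, h]

theorem mem_children_right (tree : List (Int × Option Int × Option Int)) {n rv : Int}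
    {l : Option Int} (h : List.lookup n tree = some (l, some rv)) :
    rv ∈ pvChildren tree n := by
  cases l <;> simp [pvChildren, h]

-- rec's value does not depend on the fuel, as long as fuel covers the remaining chain length
theorem recB_fuel (tree : List (Int × Option Int × Option Int)) (root : Int)
    (hp : Pre_sum_right_leaves tree root) :
    ∀ f g k n b, pvEnd tree root k n →
      tree.length + 1 - k ≤ f → tree.length + 1 - k ≤ g →
      pvRecB tree f n b = pvRecB tree g n b := by
  intro f
  induction f with
  | zero =>
    intro g k n b he hf _
    have := end_le tree root hp he; omega
  | succ f ih =>
    intro g k n b he hf hg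
    have hk := end_le tree root hp he
    obtain ⟨g', rfl⟩ : ∃ g', g = g' + 1 := ⟨g - 1, by omega⟩
    cases hlk : List.lookup n tree with
    | none => simp [pvRecB, hlk]
    | some lr =>
      obtain ⟨l, r⟩ := lr
      cases l with
      | some lv =>
        have eqL : pvRecB tree f lv false = pvRecB tree g' lv false :=
          ih g' (k + 1) lv false
            (end_child tree root he (mem_children_left tree hlk)) (by omega) (by omega)
        cases r with
        | some rv =>
          have eqR : pvRecB tree f rv true = pvRecB tree g' rv true :=
            ih g' (k + 1) rv true
              (end_child tree root he (mem_children_right tree hlk)) (by omega) (by omega)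
          simp only [pvRecB, hlk, Option.getD_some, eqL, eqR]
        | none =>
          simp only [pvRecB, hlk, Option.getD_some, eqL]
      | none =>
        cases r with
        | some rv =>
          have eqR : pvRecB tree f rv true = pvRecB tree g' rv true :=
            ih g' (k + 1) rv true
              (end_child tree root he (mem_children_right tree hlk)) (by omega) (by omega)
          simp only [pvRecB, hlk, Option.getD_some, eqR]
        | none =>
          simp only [pvRecB, hlk, Option.getD_some]

-- the canonical value of B's recursion (the fuel B's port actually uses)
def pvR (tree : List (Int × Option Int × Option Int)) (n : Int) (b : Bool) : Int :=
  pvRecB tree (tree.length + 1) n b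

-- one-step unfolding of pvR at a chain end
theorem pvR_unfold (tree : List (Int × Option Int × Option Int)) (root : Int)
    (hp : Pre_sum_right_leaves tree root) {k : Nat} (n : Int) (b : Bool)
    (he : pvEnd tree root k n) :
    pvR tree n b =
      (let lr := (List.lookup n tree).getD (none, none)
       if b = true ∧ lr.1 = none ∧ lr.2 = none then n
       else
         (match lr.1 with | some lv => pvR tree lv false | none => 0) +
         (match lr.2 with | some rv => pvR tree rv true | none => 0)) := by
  have hk := end_le tree root hp he
  cases hlk : List.lookup n tree with
  | none => simp [pvR, pvRecB, hlk]
  | some lr =>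
    obtain ⟨l, r⟩ := lr
    conv_lhs => rw [pvR, pvRecB]
    simp only [hlk, Option.getD_some]
    cases l with
    | some lv =>
      have eqL : pvRecB tree tree.length lv false = pvR tree lv false :=
        recB_fuel tree root hp tree.length (tree.length + 1) (k + 1) lv false
          (end_child tree root he (mem_children_left tree hlk)) (by omega) (by omega)
      cases r with
      | some rv =>
        have eqR : pvRecB tree tree.length rv true = pvR tree rv true :=
          recB_fuel tree root hp tree.length (tree.length + 1) (k + 1) rv true
            (end_child tree root he (mem_children_right tree hlk)) (by omega) (by omega)
        simp only [eqL, eqR]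
      | none => simp only [eqL]
    | none =>
      cases r with
      | some rv =>
        have eqR : pvRecB tree tree.length rv true = pvR tree rv true :=
          recB_fuel tree root hp tree.length (tree.length + 1) (k + 1) rv true
            (end_child tree root he (mem_children_right tree hlk)) (by omega) (by omega)
        simp only [eqR]
      | none => simp only []

def pvRSum (tree : List (Int × Option Int × Option Int)) (st : List (Int × Bool)) : Int :=
  (st.map (fun p => pvR tree p.1 p.2)).sum

-- fuel potential of the stack: each entry whose chain has k steps may cost 3^(|tree|+1-k) pops
def pvPotSum (tree : List (Int × Option Int × Option Int)) (ks : List Nat) : Nat :=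
  (ks.map (fun k => 3 ^ (tree.length + 1 - k))).sum

-- the loop invariant: with enough fuel, the loop adds the recursive value of every stack entry
theorem loopA_eq (tree : List (Int × Option Int × Option Int)) (root : Int)
    (hp : Pre_sum_right_leaves tree root) :
    ∀ fuel (st : List (Int × Bool)) (ks : List Nat) s,
      st.length = ks.length →
      (∀ p ∈ st.zip ks, pvEnd tree root p.2 p.1.1) →
      pvPotSum tree ks ≤ fuel →
      pvLoopA tree fuel st s = s + pvRSum tree st := by
  intro fuel
  induction fuel with
  | zero =>
    intro st ks s hlen hinv hf
    cases st with
    | nil => simp [pvLoopA, pvRSum]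
    | cons p st' =>
      exfalso
      cases ks with
      | nil => simp at hlen
      | cons k ks' =>
        have : 1 ≤ 3 ^ (tree.length + 1 - k) := Nat.one_le_pow _ _ (by norm_num)
        simp only [pvPotSum, List.map_cons, List.sum_cons] at hf
        omega
  | succ fuel ih =>
    intro st ks s hlen hinv hf
    cases st with
    | nil => simp [pvLoopA, pvRSum]
    | cons p st' =>
      obtain ⟨n, b⟩ := p
      cases ks with
      | nil => simp at hlen
      | cons k ks' =>
        have hlen' : st'.length = ks'.length := by simpa using hlen
        have hinv' : ∀ p ∈ st'.zip ks', pvEnd tree root p.2 p.1.1 := by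
          intro p hp'
          exact hinv p (by simp [List.zip_cons_cons, hp'])
        have hend : pvEnd tree root k n :=
          hinv ((n, b), k) (by simp [List.zip_cons_cons])
        have hk := end_le tree root hp hend
        simp only [pvPotSum, List.map_cons, List.sum_cons] at hf
        have hpow : 3 ^ (tree.length + 1 - k) = 3 * 3 ^ (tree.length - k) := by
          rw [← pow_succ']
          congr 1
          omega
        have h1 : (1:Nat) ≤ 3 ^ (tree.length - k) := Nat.one_le_pow _ _ (by norm_num)
        have hRn := pvR_unfold tree root hp n b hend
        cases hlk : List.lookup n tree with
        | none =>
          -- the node is not a key: leaf-like, nothing is pushed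
          simp only [pvLoopA, hlk, Option.getD_none]
          rw [ih st' ks' _ hlen' hinv'
            (by rw [hpow] at hf; simp only [pvPotSum]; omega)]
          simp only [hlk, Option.getD_none] at hRn
          simp only [pvRSum, List.map_cons, List.sum_cons, hRn]
          cases b <;> simp <;> ring
        | some lr =>
          obtain ⟨l, r⟩ := lr
          simp only [pvLoopA, hlk, Option.getD_some]
          simp only [hlk, Option.getD_some] at hRn
          cases l with
          | some lv =>
            have heL : pvEnd tree root (k + 1) lv :=
              end_child tree root hend (mem_children_left tree hlk)
            cases r with
            | some rv =>
              have heR : pvEnd tree root (k + 1) rv :=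
                end_child tree root hend (mem_children_right tree hlk)
              rw [ih ((lv, false) :: (rv, true) :: st') ((k+1) :: (k+1) :: ks') _
                (by simpa using hlen')
                (by intro p hp'
                    simp only [List.zip_cons_cons, List.mem_cons] at hp'
                    rcases hp' with rfl | rfl | hp'
                    · exact heL
                    · exact heR
                    · exact hinv' p hp')
                (by simp only [pvPotSum, List.map_cons, List.sum_cons]
                    have : tree.length + 1 - (k + 1) = tree.length - k := by omega
                    rw [this]; rw [hpow] at hf; omega)]
              rw [if_neg (by simp)] at hRn
              rw [if_neg (by simp)]
              simp only [pvRSum, List.map_cons, List.sum_cons, hRn]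
              ring
            | none =>
              rw [ih ((lv, false) :: st') ((k+1) :: ks') _
                (by simpa using hlen')
                (by intro p hp'
                    simp only [List.zip_cons_cons, List.mem_cons] at hp'
                    rcases hp' with rfl | hp'
                    · exact heL
                    · exact hinv' p hp')
                (by simp only [pvPotSum, List.map_cons, List.sum_cons]
                    have : tree.length + 1 - (k + 1) = tree.length - k := by omega
                    rw [this]; rw [hpow] at hf; omega)]
              rw [if_neg (by simp)] at hRn
              rw [if_neg (by simp)]
              simp only [pvRSum, List.map_cons, List.sum_cons, hRn]
              ring
          | none =>
            cases r with
            | some rv =>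
              have heR : pvEnd tree root (k + 1) rv :=
                end_child tree root hend (mem_children_right tree hlk)
              rw [ih ((rv, true) :: st') ((k+1) :: ks') _
                (by simpa using hlen')
                (by intro p hp'
                    simp only [List.zip_cons_cons, List.mem_cons] at hp'
                    rcases hp' with rfl | hp'
                    · exact heR
                    · exact hinv' p hp')
                (by simp only [pvPotSum, List.map_cons, List.sum_cons]
                    have : tree.length + 1 - (k + 1) = tree.length - k := by omega
                    rw [this]; rw [hpow] at hf; omega)]
              rw [if_neg (by simp)] at hRn
              rw [if_neg (by simp)]
              simp only [pvRSum, List.map_cons, List.sum_cons, hRn]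
              ring
            | none =>
              rw [ih st' ks' _ hlen' hinv'
                (by rw [hpow] at hf; simp only [pvPotSum]; omega)]
              simp only [pvRSum, List.map_cons, List.sum_cons, hRn]
              cases b <;> simp <;> ring

-- ===== VERDICT (by name: the statement is the Claim_ definition above) =====
theorem sum_right_leaves_spec : Claim_equal_sum_right_leaves := by
  intro tree root _ hp
  show sum_right_leaves tree root = sum_right_leaves_alt tree root
  have h := loopA_eq tree root hp (3 ^ (tree.length + 1)) [(root, false)] [0] 0
    (by simp)
    (by intro p hp'
        simp only [List.zip_cons_cons, List.zip_nil_left, List.mem_cons,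
          List.not_mem_nil, or_false] at hp'
        subst hp'
        exact end_root tree root)
    (by simp [pvPotSum])
  rw [sum_right_leaves, h]
  simp [pvRSum, pvR, sum_right_leaves_alt]
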